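-- pv_equiv track=rewrite | github.com/ray-project/ray | python/ray/test_utils.py | same_elements
-- ===== SOURCE A (Python) =====
-- def same_elements(elems_a, elems_b):
--     """Checks if two iterables (such as lists) contain the same elements. Elements
--         do not have to be hashable (this allows us to compare sets of dicts for
--         example). This comparison is not necessarily efficient.
--     """
--     a = list(elems_a)
--     b = list(elems_b)
--
--     for x in a:
--         if x not in b:
--             return False
--
--     for x in b:
--         if x not in a:
--             return False
--
--     return True
-- ===== SOURCE B (Python) =====
-- def same_elements(elems_a, elems_b):
--     """Checks if two iterables contain the same elements (unhashable allowed)."""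
--     ua = []
--     for x in elems_a:
--         if x not in ua:
--             ua.append(x)
--     ub = []
--     for x in elems_b:
--         if x not in ub:
--             ub.append(x)
--     return len(ua) == len(ub) and all(x in ub for x in ua)
-- ===== Notes on version B (the rewrite author's own statement) =====
-- stated objective: alternative
-- what changed: Replaces A's two mirror subset loops by dedup-then-check: build unique-element lists of each input, then compare their lengths and test subset in one direction only.
import Mathlib
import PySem

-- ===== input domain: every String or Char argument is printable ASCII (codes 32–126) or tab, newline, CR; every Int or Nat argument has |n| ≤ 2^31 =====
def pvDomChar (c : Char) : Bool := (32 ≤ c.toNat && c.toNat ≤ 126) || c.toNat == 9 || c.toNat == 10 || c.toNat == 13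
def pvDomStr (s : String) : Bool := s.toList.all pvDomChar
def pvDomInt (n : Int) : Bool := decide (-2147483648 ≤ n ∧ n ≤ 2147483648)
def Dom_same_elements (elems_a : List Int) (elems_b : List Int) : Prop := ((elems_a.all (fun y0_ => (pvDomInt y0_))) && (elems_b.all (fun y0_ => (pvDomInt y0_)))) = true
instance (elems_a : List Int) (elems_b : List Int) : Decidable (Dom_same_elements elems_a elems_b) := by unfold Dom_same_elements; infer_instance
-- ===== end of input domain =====

-- B replaces A's two mirror subset loops by dedup-then-check (unique lists, length equality, one-direction subset); an alternative decomposition, return values proved equal.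


-- ===== PORT A =====
-- two subset loops with early return; 'for x in a: if x not in b: return False' is List.all with contains
def same_elements (elems_a : List Int) (elems_b : List Int) : Bool :=
  let a := elems_a
  let b := elems_b
  if !(a.all (fun x => b.contains x)) then false
  else if !(b.all (fun x => a.contains x)) then false
  else true

-- ===== PORT B =====
-- dedup loop: append x only when not yet seen
def pvUniq (xs : List Int) : List Int :=
  xs.foldl (fun acc x => if acc.contains x then acc else acc ++ [x]) []

def same_elements_alt (elems_a : List Int) (elems_b : List Int) : Bool :=
  let ua := pvUniq elems_a
  let ub := pvUniq elems_b
  (ua.length == ub.length) && ua.all (fun x => ub.contains x)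

-- ===== PRECONDITION & SPEC =====
def Spec_same_elements (elems_a : List Int) (elems_b : List Int) (out : Bool) : Prop := out = same_elements_alt elems_a elems_b
instance (elems_a : List Int) (elems_b : List Int) (out : Bool) : Decidable (Spec_same_elements elems_a elems_b out) := by unfold Spec_same_elements; infer_instance

-- ===== CLAIM (what is proved, stated in full; the proofs are below) =====
def Claim_equal_same_elements : Prop := ∀ (elems_a : List Int) (elems_b : List Int), Dom_same_elements elems_a elems_b → Spec_same_elements elems_a elems_b (same_elements elems_a elems_b)

-- ===== LEMMAS AND PROOFS =====

theorem pvUniq_aux (xs acc : List Int) (h : acc.Nodup) :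
    (xs.foldl (fun acc x => if acc.contains x then acc else acc ++ [x]) acc).Nodup ∧
    ∀ y, y ∈ xs.foldl (fun acc x => if acc.contains x then acc else acc ++ [x]) acc ↔ (y ∈ acc ∨ y ∈ xs) := by
  induction xs generalizing acc with
  | nil => simpa using h
  | cons x xs ih =>
    simp only [List.foldl_cons]
    by_cases hx : acc.contains x = true
    · rw [if_pos hx]
      have hxmem : x ∈ acc := by simpa [List.contains_iff_mem] using hx
      obtain ⟨h1, h2⟩ := ih acc h
      refine ⟨h1, fun y => ?_⟩
      rw [h2 y]
      simp only [List.mem_cons]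
      constructor
      · rintro (hy | hy) <;> tauto
      · rintro (hy | rfl | hy) <;> tauto
    · rw [if_neg hx]
      have hxmem : x ∉ acc := by simpa [List.contains_iff_mem] using hx
      have hnd : (acc ++ [x]).Nodup := by
        refine List.Nodup.append h (List.nodup_singleton x) ?_
        intro a ha hax
        simp only [List.mem_singleton] at hax
        exact hxmem (hax ▸ ha)
      obtain ⟨h1, h2⟩ := ih (acc ++ [x]) hnd
      refine ⟨h1, fun y => ?_⟩
      rw [h2 y]
      simp only [List.mem_append, List.mem_cons]
      tauto

theorem pvUniq_nodup (xs : List Int) : (pvUniq xs).Nodup :=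
  (pvUniq_aux xs [] List.nodup_nil).1

theorem mem_pvUniq (xs : List Int) (y : Int) : y ∈ pvUniq xs ↔ y ∈ xs := by
  have := (pvUniq_aux xs [] List.nodup_nil).2 y
  simpa [pvUniq] using this

-- B's result is false when some element of one input is missing from the other
theorem alt_false_of_missing_a (a b : List Int) (x : Int) (hxa : x ∈ a) (hxb : x ∉ b) :
    same_elements_alt a b = false := by
  simp only [same_elements_alt, Bool.and_eq_false_iff]
  right
  rw [List.all_eq_false]
  refine ⟨x, (mem_pvUniq a x).mpr hxa, ?_⟩
  simp [mem_pvUniq, hxb]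

theorem alt_false_of_missing_b (a b : List Int) (x : Int) (hxb : x ∈ b) (hxa : x ∉ a) :
    same_elements_alt a b = false := by
  by_contra hB
  rw [Bool.not_eq_false] at hB
  simp only [same_elements_alt, Bool.and_eq_true, beq_iff_eq, List.all_eq_true,
    List.contains_iff_mem] at hB
  obtain ⟨hlen, hsub⟩ := hB
  have hsub' : pvUniq a ⊆ pvUniq b := fun y hy => by simpa using hsub y hy
  have hperm : List.Perm (pvUniq a) (pvUniq b) :=
    ((pvUniq_nodup a).subperm hsub').perm_of_length_le (le_of_eq hlen.symm)
  exact hxa ((mem_pvUniq a x).mp (hperm.mem_iff.mpr ((mem_pvUniq b x).mpr hxb)))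

theorem same_elements_spec_aux (a b : List Int) : same_elements a b = same_elements_alt a b := by
  simp only [same_elements]
  split_ifs with h1 h2
  · -- some x ∈ a with x ∉ b
    have h1' : (a.all fun x => b.contains x) = false := by simpa using h1
    obtain ⟨x, hxa, hxb⟩ := List.all_eq_false.mp h1'
    exact (alt_false_of_missing_a a b x hxa
      (by simpa [List.contains_iff_mem] using hxb)).symm
  · -- some x ∈ b with x ∉ a
    have h2' : (b.all fun x => a.contains x) = false := by simpa using h2
    obtain ⟨x, hxb, hxa⟩ := List.all_eq_false.mp h2'
    exact (alt_false_of_missing_b a b x hxb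
      (by simpa [List.contains_iff_mem] using hxa)).symm
  · -- mutual subset
    have h1' : (a.all fun x => b.contains x) = true := by simpa using h1
    have h2' : (b.all fun x => a.contains x) = true := by simpa using h2
    have hab : ∀ x ∈ a, x ∈ b := fun x hx => by
      simpa [List.contains_iff_mem] using List.all_eq_true.mp h1' x hx
    have hba : ∀ x ∈ b, x ∈ a := fun x hx => by
      simpa [List.contains_iff_mem] using List.all_eq_true.mp h2' x hx
    have hsub1 : pvUniq a ⊆ pvUniq b := fun y hy =>
      (mem_pvUniq b y).mpr (hab y ((mem_pvUniq a y).mp hy))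
    have hsub2 : pvUniq b ⊆ pvUniq a := fun y hy =>
      (mem_pvUniq a y).mpr (hba y ((mem_pvUniq b y).mp hy))
    have hlen1 := ((pvUniq_nodup a).subperm hsub1).length_le
    have hlen2 := ((pvUniq_nodup b).subperm hsub2).length_le
    have hlen : (pvUniq a).length = (pvUniq b).length := Nat.le_antisymm hlen1 hlen2
    have halt : same_elements_alt a b = true := by
      simp only [same_elements_alt, Bool.and_eq_true, beq_iff_eq, List.all_eq_true,
        List.contains_iff_mem]
      exact ⟨hlen, fun x hx => hsub1 hx⟩
    exact halt.symm

-- ===== VERDICT (by name: the statement is the Claim_ definition above) =====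
theorem same_elements_spec : Claim_equal_same_elements := by
  intro a b _
  unfold Spec_same_elements
  exact same_elements_spec_aux a b
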